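-- pv_equiv track=rewrite | github.com/Radcliffe/OEIS-Python | src/oeispy/A384/A384990.py | apply_transformation
-- ===== SOURCE A (Python) =====
-- def apply_transformation(seq):
--     step = 1
--     i = step
--     while i < len(seq):
--         seq.append(seq.pop(i))
--         step += 1
--         i += step - 1
--     return seq
-- ===== SOURCE B (Python) =====
-- def apply_transformation(seq):
--     # O(n) one-pass: the prefix before the current pop index is final; keep the
--     # live tail as a window buf[j:] and do each pop-append as an O(1) rotation.
--     n = len(seq)
--     buf = list(seq)
--     fixed = []
--     j = 0
--     i = 1
--     step = 1
--     while i < n: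
--         k = i - len(fixed)
--         fixed += buf[j:j + k]
--         j += k
--         buf.append(buf[j])
--         j += 1
--         i += step
--         step += 1
--     seq[:] = fixed + buf[j:]
--     return seq
-- ===== Notes on version B (the rewrite author's own statement) =====
-- stated objective: faster
-- what changed: Instead of repeated O(n) list.pop(i) calls, B freezes the prefix before the growing pop index and keeps the live tail as a window buf[j:], so each pop-and-append becomes an O(1) rotation (read buf[j], append it, advance j), giving one O(n) pass overall.
import Mathlib
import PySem

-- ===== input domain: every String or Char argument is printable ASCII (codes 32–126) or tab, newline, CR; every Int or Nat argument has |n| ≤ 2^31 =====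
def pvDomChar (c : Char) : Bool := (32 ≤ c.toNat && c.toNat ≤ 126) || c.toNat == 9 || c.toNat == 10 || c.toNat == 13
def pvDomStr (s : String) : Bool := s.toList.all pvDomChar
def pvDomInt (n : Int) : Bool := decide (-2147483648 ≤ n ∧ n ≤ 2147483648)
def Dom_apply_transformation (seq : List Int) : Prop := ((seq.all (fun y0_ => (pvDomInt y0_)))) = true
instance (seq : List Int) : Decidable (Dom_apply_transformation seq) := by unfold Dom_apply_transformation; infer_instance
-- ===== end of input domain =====

-- B replaces A's repeated pop(i) (O(n) each) by a single pass with a frozen prefix and an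
-- O(1) tail rotation: measurably faster (asymptotic, O(n) vs O(n^1.5)).
-- Both Pythons mutate `seq` in place and end with the same final contents; the theorems
-- below are about the returned value.

-- ===== PORT A =====
-- while loop with i strictly increasing: structural recursion on fuel = seq.length,
-- which bounds the iteration count (i starts at 1 and grows by ≥ 1 per iteration).
def applyGo : Nat → List Int → Int → Int → List Int
  | 0, seq, _, _ => seq
  | fuel+1, seq, step, i =>
    if i < (seq.length : Int) then
      match PySem.List.pop? seq i with
      | some (x, rest) => applyGo fuel (rest ++ [x]) (step + 1) (i + (step + 1) - 1)
      | none => seq   -- unreachable: 0 ≤ i < len(seq) there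
    else seq

def apply_transformation (seq : List Int) : List Int :=
  applyGo seq.length seq 1 1

-- ===== PORT B =====
-- state (buf, fixed, j); each iteration: freeze buf[j:j+k] onto fixed, then rotate one
-- element of the live tail (buf.append(buf[j]); j += 1). Same fuel bound as A's loop.
def altGo : Nat → List Int → List Int → Int → Int → Int → Int → List Int × List Int × Int
  | 0, buf, fixed, j, _, _, _ => (buf, fixed, j)
  | fuel+1, buf, fixed, j, i, step, n =>
    if i < n then
      let k := i - (fixed.length : Int)
      let fixed' := fixed ++ PySem.List.slice buf (some j) (some (j + k))
      let j' := j + k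
      match PySem.List.pyGet? buf j' with
      | some x => altGo fuel (buf ++ [x]) fixed' (j' + 1) (i + step) (step + 1) n
      | none => (buf, fixed', j')   -- unreachable: Python would raise IndexError
    else (buf, fixed, j)

def apply_transformation_alt (seq : List Int) : List Int :=
  let r := altGo seq.length seq [] 0 1 1 seq.length
  r.2.1 ++ PySem.List.slice r.1 (some r.2.2) none

-- ===== PRECONDITION & SPEC =====
def Spec_apply_transformation (seq : List Int) (out : List Int) : Prop := out = apply_transformation_alt seq
instance (seq : List Int) (out : List Int) : Decidable (Spec_apply_transformation seq out) := by unfold Spec_apply_transformation; infer_instance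

-- ===== CLAIM (what is proved, stated in full; the proofs are below) =====
def Claim_equal_apply_transformation : Prop := ∀ (seq : List Int), Dom_apply_transformation seq → Spec_apply_transformation seq (apply_transformation seq)

-- ===== LEMMAS AND PROOFS =====

theorem loop_eq : ∀ (fuel : Nat) (fixed buf : List Int) (jn : Nat) (step i n : Int),
    jn ≤ buf.length →
    0 < step →
    (fixed.length : Int) ≤ i →
    n = (fixed.length : Int) + ((buf.length - jn : Nat) : Int) →
    applyGo fuel (fixed ++ buf.drop jn) step i =
      (altGo fuel buf fixed (jn : Int) i step n).2.1 ++
        PySem.List.slice (altGo fuel buf fixed (jn : Int) i step n).1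
          (some (altGo fuel buf fixed (jn : Int) i step n).2.2) none := by
  intro fuel
  induction fuel with
  | zero =>
    intro fixed buf jn step i n hj hs hi hn
    simp [applyGo, altGo, PySem.List.slice_from_natCast]
  | succ fuel ih =>
    intro fixed buf jn step i n hj hs hi hn
    have hlen : ((fixed ++ buf.drop jn).length : Int) = n := by
      simp; omega
    by_cases hcond : i < n
    · -- loop body runs
      set kN : Nat := (i - (fixed.length : Int)).toNat with hkdef
      have hkcast : i - (fixed.length : Int) = (kN : Int) := by omega
      have hklt : jn + kN < buf.length := by
        have : i < (fixed.length : Int) + ((buf.length - jn : Nat) : Int) := by omega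
        omega
      set iN : Nat := fixed.length + kN with hidef
      have hicast : i = (iN : Int) := by simp [hidef]; omega
      have hiNlt : iN < (fixed ++ buf.drop jn).length := by simp; omega
      -- element popped
      have hget : (fixed ++ buf.drop jn)[iN]'hiNlt = buf[jn + kN]'hklt := by
        rw [List.getElem_append_right (by omega)]
        simp [List.getElem_drop]
        congr 1; omega
      -- A side unfold
      have hA : applyGo (fuel+1) (fixed ++ buf.drop jn) step i =
          applyGo fuel (((fixed ++ buf.drop jn).eraseIdx iN) ++ [buf[jn+kN]'hklt]) (step+1) (i + (step+1) - 1) := by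
        simp only [applyGo]
        rw [if_pos (by omega)]
        rw [hicast, PySem.List.pop?_natCast (fixed ++ buf.drop jn) iN hiNlt]
        simp [hget]
      -- B side unfold
      have hslice : PySem.List.slice buf (some (jn : Int)) (some ((jn : Int) + (i - (fixed.length : Int)))) =
          (buf.drop jn).take kN := by
        rw [hkcast]
        rw [show ((jn : Int) + (kN : Int)) = ((jn + kN : Nat) : Int) by push_cast; ring]
        rw [PySem.List.slice_natCast]
        congr 1; omega
      have hgetB : PySem.List.pyGet? buf ((jn : Int) + (i - (fixed.length : Int))) = some (buf[jn+kN]'hklt) := by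
        rw [hkcast, show ((jn : Int) + (kN : Int)) = ((jn + kN : Nat) : Int) by push_cast; ring]
        rw [PySem.List.pyGet?_natCast]
        simp [List.getElem?_eq_getElem hklt]
      have hB : altGo (fuel+1) buf fixed (jn : Int) i step n =
          altGo fuel (buf ++ [buf[jn+kN]'hklt]) (fixed ++ (buf.drop jn).take kN)
            ((jn + kN + 1 : Nat) : Int) (i + step) (step + 1) n := by
        simp only [altGo]
        rw [if_pos hcond]
        simp only [hslice, hgetB]
        congr 1
        push_cast
        omega
      rw [hA, hB]
      -- rewrite A's new list into the invariant shape
      have hseq : ((fixed ++ buf.drop jn).eraseIdx iN) ++ [buf[jn+kN]'hklt] =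
          (fixed ++ (buf.drop jn).take kN) ++ (buf ++ [buf[jn+kN]'hklt]).drop (jn + kN + 1) := by
        rw [List.eraseIdx_append_of_length_le (by omega)]
        rw [show iN - fixed.length = kN by omega]
        rw [List.eraseIdx_eq_take_drop_succ, List.drop_drop]
        rw [List.drop_append_of_le_length (by omega)]
        rw [show jn + (kN + 1) = jn + kN + 1 from by omega]
        simp [List.append_assoc]
      rw [show i + (step+1) - 1 = i + step by ring, hseq]
      apply ih
      · simp; omega
      · omega
      · have : ((fixed ++ (buf.drop jn).take kN).length : Int) = i := by
          simp; omega
        omega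
      · simp
        omega
    · -- loop exits
      have : ¬ i < ((fixed ++ buf.drop jn).length : Int) := by omega
      simp only [applyGo, altGo, if_neg hcond, if_neg this]
      simp [PySem.List.slice_from_natCast]

theorem apply_transformation_spec : Claim_equal_apply_transformation := by
  intro seq _
  unfold Spec_apply_transformation apply_transformation apply_transformation_alt
  have h := loop_eq seq.length [] seq 0 1 1 (seq.length : Int)
    (by omega) (by omega) (by simp) (by simp)
  simpa using h
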